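-- pv_equiv track=rewrite | github.com/baskerbyte/basenator | src/converter.py | convert_to_num
-- ===== SOURCE A (Python) =====
-- alphabet = "ABCDEFGHIJKLMNOPQRSTUVWXYZ"
--
-- def convert_to_num(num, num_base):
--     parsed = []
--     result = 0
--
--     for i in range(len(num)):
--         if num[i].isalpha():
--             parsed.append(10 + alphabet.find(num[i]))
--         else:
--             parsed.append(int(num[i]))
--
--         result += (num_base ** i) * parsed[i]
--
--     return result
-- ===== SOURCE B (Python) =====
-- alphabet = "ABCDEFGHIJKLMNOPQRSTUVWXYZ"
--
--
-- def _digit_value(ch):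
--     if ch.isalpha():
--         return 10 + alphabet.find(ch)
--     return int(ch)
--
--
-- def convert_to_num(num, num_base):
--     result = 0
--     for ch in reversed(num):
--         result = result * num_base + _digit_value(ch)
--     return result
-- ===== Notes on version B (the rewrite author's own statement) =====
-- stated objective: faster
-- what changed: Replaces the per-digit exponentiation num_base**i (and the parsed accumulator list) with a single Horner pass over the reversed string that maintains the running value with one multiplication per character.
import Mathlib
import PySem

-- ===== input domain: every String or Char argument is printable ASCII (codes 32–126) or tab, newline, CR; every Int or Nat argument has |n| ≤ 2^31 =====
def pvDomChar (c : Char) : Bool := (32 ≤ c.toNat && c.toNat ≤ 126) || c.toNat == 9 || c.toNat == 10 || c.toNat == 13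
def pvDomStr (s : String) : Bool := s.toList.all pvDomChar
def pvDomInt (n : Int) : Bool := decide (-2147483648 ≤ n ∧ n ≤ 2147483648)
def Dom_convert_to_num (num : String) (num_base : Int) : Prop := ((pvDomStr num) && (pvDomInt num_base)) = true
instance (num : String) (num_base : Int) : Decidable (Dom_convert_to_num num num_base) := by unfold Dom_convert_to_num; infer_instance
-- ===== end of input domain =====

-- B replaces A's per-digit exponentiation num_base**i (and the parsed list) with a single
-- Horner pass over the reversed string: one multiplication per character (faster in a timing run).

-- ===== PORT A =====
-- A: builds `parsed` and adds (num_base ** i) * parsed[i] for each i in range(len(num)).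
def convert_to_num (num : String) (num_base : Int) : Int :=
  let chars := num.toList
  let st :=
    (PySem.List.pyRange 0 (PySem.Str.len num) 1).foldl
      (fun (st : List Int × Int) i =>
        let c := PySem.List.pyGetD chars i ' '
        -- int(num[i]) raises ValueError on non-digit chars: Pre_ excludes those, default 0 here
        let parsed :=
          if PySem.Chars.isalpha c then
            st.1 ++ [10 + PySem.Str.find "ABCDEFGHIJKLMNOPQRSTUVWXYZ" (String.ofList [c])]
          else
            st.1 ++ [(PySem.Int.ofChars? [c]).getD 0]
        (parsed, st.2 + num_base ^ i.toNat * PySem.List.pyGetD parsed i 0))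
      ([], 0)
  st.2

-- ===== PORT B =====
-- helper _digit_value of Source B
def pvDigitVal (c : Char) : Int :=
  if PySem.Chars.isalpha c then
    10 + PySem.Str.find "ABCDEFGHIJKLMNOPQRSTUVWXYZ" (String.ofList [c])
  else
    (PySem.Int.ofChars? [c]).getD 0

def convert_to_num_alt (num : String) (num_base : Int) : Int :=
  num.toList.reverse.foldl (fun result ch => result * num_base + pvDigitVal ch) 0

-- ===== PRECONDITION & SPEC =====
-- Pre_ excludes exactly the inputs where Python A raises: a character that is neither a
-- digit nor a letter makes int(num[i]) raise ValueError.
def Pre_convert_to_num (num : String) (num_base : Int) : Prop :=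
  num.toList.all (fun c => PySem.Chars.isdigit c || PySem.Chars.isalpha c) = true

instance (num : String) (num_base : Int) : Decidable (Pre_convert_to_num num num_base) := by
  unfold Pre_convert_to_num; infer_instance

def pvWitness_convert_to_num : String × Int := ("A3F", 16)

def Spec_convert_to_num (num : String) (num_base : Int) (out : Int) : Prop :=
  out = convert_to_num_alt num num_base

instance (num : String) (num_base : Int) (out : Int) : Decidable (Spec_convert_to_num num num_base out) := by
  unfold Spec_convert_to_num; infer_instance

-- ===== CLAIM (what is proved, stated in full; the proofs are below) =====
def Claim_equal_convert_to_num : Prop :=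
  ∀ (num : String) (num_base : Int), Dom_convert_to_num num num_base →
    Pre_convert_to_num num num_base →
    Spec_convert_to_num num num_base (convert_to_num num num_base)

-- ===== LEMMAS AND PROOFS =====

-- shifting the Horner accumulator
theorem pv_horner_shift (b : Int) (l : List Char) (a : Int) :
    l.foldl (fun result ch => result * b + pvDigitVal ch) a
      = a * b ^ l.length + l.foldl (fun result ch => result * b + pvDigitVal ch) 0 := by
  induction l generalizing a with
  | nil => simp
  | cons x xs ih =>
    simp only [List.foldl_cons, List.length_cons]
    rw [ih (a * b + pvDigitVal x), ih (0 * b + pvDigitVal x)]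
    ring

-- the body of A's loop, named so the invariant can talk about it
def pvAStep (chars : List Char) (b : Int) (st : List Int × Int) (i : Int) : List Int × Int :=
  let c := PySem.List.pyGetD chars i ' '
  let parsed :=
    if PySem.Chars.isalpha c then
      st.1 ++ [10 + PySem.Str.find "ABCDEFGHIJKLMNOPQRSTUVWXYZ" (String.ofList [c])]
    else
      st.1 ++ [(PySem.Int.ofChars? [c]).getD 0]
  (parsed, st.2 + b ^ i.toNat * PySem.List.pyGetD parsed i 0)

theorem pvAStep_parsed (chars : List Int) (cs : List Char) (b r : Int) (i : Int) :
    pvAStep cs b (chars, r) i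
      = (chars ++ [pvDigitVal (PySem.List.pyGetD cs i ' ')],
         r + b ^ i.toNat * PySem.List.pyGetD (chars ++ [pvDigitVal (PySem.List.pyGetD cs i ' ')]) i 0) := by
  simp only [pvAStep, pvDigitVal]
  split <;> simp

-- main invariant: A's fold over range(len chars) computes (map pvDigitVal chars, Horner value)
theorem pv_main (b : Int) (cs : List Char) :
    (PySem.List.pyRange 0 (cs.length : Int) 1).foldl (pvAStep cs b) ([], 0)
      = (cs.map pvDigitVal, cs.reverse.foldl (fun result ch => result * b + pvDigitVal ch) 0) := by
  induction cs using List.reverseRecOn with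
  | nil => simp [PySem.List.pyRange]
  | append_singleton ys c ih =>
    have hlen : ((ys ++ [c]).length : Int) = (ys.length : Int) + 1 := by simp
    rw [hlen, PySem.List.pyRange_one_succ_right (by positivity), List.foldl_append]
    have hcongr :
        (PySem.List.pyRange 0 (ys.length : Int) 1).foldl (pvAStep (ys ++ [c]) b) ([], 0)
          = (PySem.List.pyRange 0 (ys.length : Int) 1).foldl (pvAStep ys b) ([], 0) := by
      apply PySem.List.foldl_congr_mem
      intro st i hi
      have hmem := PySem.List.mem_pyRange_one.mp hi
      have h0 : 0 ≤ i := hmem.1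
      have h1 : i < (ys.length : Int) := hmem.2
      have hget : PySem.List.pyGetD (ys ++ [c]) i ' ' = PySem.List.pyGetD ys i ' ' := by
        rw [PySem.List.pyGetD_eq_getElem _ _ h0 (by simp; omega),
            PySem.List.pyGetD_eq_getElem _ _ h0 (by simpa using h1)]
        rw [List.getElem_append_left (by omega)]
      simp only [pvAStep, hget]
    rw [hcongr, ih]
    simp only [List.foldl_cons, List.foldl_nil]
    rw [pvAStep_parsed]
    have hc : PySem.List.pyGetD (ys ++ [c]) (ys.length : Int) ' ' = c := by
      rw [PySem.List.pyGetD_eq_getElem _ _ (by positivity) (by simp)]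
      simp
    have hd : PySem.List.pyGetD (ys.map pvDigitVal ++ [pvDigitVal c]) (ys.length : Int) 0
        = pvDigitVal c := by
      rw [PySem.List.pyGetD_eq_getElem _ _ (by positivity) (by simp)]
      have : (ys.length : Int).toNat = (ys.map pvDigitVal).length := by simp
      simp [this]
    rw [hc, Prod.mk.injEq]
    constructor
    · simp
    · rw [hd]
      rw [List.reverse_append, List.reverse_singleton, List.singleton_append, List.foldl_cons]
      rw [pv_horner_shift b ys.reverse (0 * b + pvDigitVal c)]
      simp only [List.length_reverse, Int.toNat_natCast]
      ring

-- ===== VERDICT (by name: the statement is the Claim_ definition above) =====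
theorem convert_to_num_spec : Claim_equal_convert_to_num := by
  intro num num_base _ _
  unfold Spec_convert_to_num convert_to_num_alt
  have hlen : PySem.Str.len num = (num.toList.length : Int) := by
    simp [PySem.Str.len]
  have hA : convert_to_num num num_base
      = ((PySem.List.pyRange 0 (PySem.Str.len num) 1).foldl (pvAStep num.toList num_base) ([], 0)).2 := rfl
  rw [hA, hlen, pv_main]
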